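-- pv_equiv track=rewrite | github.com/JosephJonathanFernandes/FinFeeX | src/fee_detector.py | categorize_fee
-- ===== SOURCE A (Python) =====
-- def categorize_fee(line: str) -> str:
--     """Categorize fee based on keywords in the line."""
--     line_lower = line.lower()
--
--     if any(k in line_lower for k in ["foreign", "fx", "currency"]):
--         return "Foreign Exchange"
--     elif any(k in line_lower for k in ["annual", "renewal", "membership"]):
--         return "Annual/Renewal"
--     elif any(k in line_lower for k in ["maintenance", "minimum balance"]):
--         return "Account Maintenance"
--     elif any(k in line_lower for k in ["late payment", "penalty", "overdraft"]):
--         return "Penalties"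
--     elif any(k in line_lower for k in ["atm", "cash withdrawal"]):
--         return "ATM/Withdrawal"
--     elif any(k in line_lower for k in ["convenience", "processing", "transaction"]):
--         return "Transaction Fees"
--     elif any(k in line_lower for k in ["sms", "alert", "statement"]):
--         return "Communication"
--     else:
--         return "Other Fees"
-- ===== SOURCE B (Python) =====
-- # Flat (keyword, priority, category) scan: one pass keeping the best (lowest-priority)
-- # match, instead of an ordered if/elif keyword-group dispatch with early return.
-- FEE_KEYWORDS = [
--     ("foreign", 0, "Foreign Exchange"),
--     ("fx", 0, "Foreign Exchange"),
--     ("currency", 0, "Foreign Exchange"),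
--     ("annual", 1, "Annual/Renewal"),
--     ("renewal", 1, "Annual/Renewal"),
--     ("membership", 1, "Annual/Renewal"),
--     ("maintenance", 2, "Account Maintenance"),
--     ("minimum balance", 2, "Account Maintenance"),
--     ("late payment", 3, "Penalties"),
--     ("penalty", 3, "Penalties"),
--     ("overdraft", 3, "Penalties"),
--     ("atm", 4, "ATM/Withdrawal"),
--     ("cash withdrawal", 4, "ATM/Withdrawal"),
--     ("convenience", 5, "Transaction Fees"),
--     ("processing", 5, "Transaction Fees"),
--     ("transaction", 5, "Transaction Fees"),
--     ("sms", 6, "Communication"),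
--     ("alert", 6, "Communication"),
--     ("statement", 6, "Communication"),
-- ]
--
--
-- def categorize_fee(line: str) -> str:
--     """Categorize fee based on keywords in the line."""
--     low = line.lower()
--     best = None
--     for kw, prio, cat in FEE_KEYWORDS:
--         if kw in low and (best is None or prio < best[0]):
--             best = (prio, cat)
--     return best[1] if best is not None else "Other Fees"
-- ===== Notes on version B (the rewrite author's own statement) =====
-- stated objective: alternative
-- what changed: Replaces the early-returning if/elif keyword-group dispatch with a single pass over a flat (keyword, priority, category) list that keeps the lowest-priority match in an accumulator and returns it (or the default) at the end.
import Mathlib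
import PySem

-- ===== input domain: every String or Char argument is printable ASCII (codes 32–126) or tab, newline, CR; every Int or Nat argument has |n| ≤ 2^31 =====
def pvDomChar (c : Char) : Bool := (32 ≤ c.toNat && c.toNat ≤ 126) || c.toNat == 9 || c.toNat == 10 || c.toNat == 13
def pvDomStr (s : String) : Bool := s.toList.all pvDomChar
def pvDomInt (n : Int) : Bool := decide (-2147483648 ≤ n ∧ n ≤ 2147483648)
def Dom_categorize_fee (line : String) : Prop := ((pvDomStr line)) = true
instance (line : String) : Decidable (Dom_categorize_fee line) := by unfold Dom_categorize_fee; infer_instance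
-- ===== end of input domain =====

-- B replaces the early-returning if/elif keyword-group dispatch with a single pass over a
-- flat (keyword, priority, category) list keeping the lowest-priority match (alternative; same cost).


-- ===== PORT A =====
def categorize_fee (line : String) : String :=
  let line_lower := PySem.Str.lower line
  if ["foreign", "fx", "currency"].any (fun k => PySem.Str.isIn k line_lower) then
    "Foreign Exchange"
  else if ["annual", "renewal", "membership"].any (fun k => PySem.Str.isIn k line_lower) then
    "Annual/Renewal"
  else if ["maintenance", "minimum balance"].any (fun k => PySem.Str.isIn k line_lower) then
    "Account Maintenance"
  else if ["late payment", "penalty", "overdraft"].any (fun k => PySem.Str.isIn k line_lower) then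
    "Penalties"
  else if ["atm", "cash withdrawal"].any (fun k => PySem.Str.isIn k line_lower) then
    "ATM/Withdrawal"
  else if ["convenience", "processing", "transaction"].any (fun k => PySem.Str.isIn k line_lower) then
    "Transaction Fees"
  else if ["sms", "alert", "statement"].any (fun k => PySem.Str.isIn k line_lower) then
    "Communication"
  else
    "Other Fees"

-- ===== PORT B =====
-- flat keyword table: (keyword, priority, category)
def feeKeywords : List (String × Int × String) :=
  [ ("foreign", 0, "Foreign Exchange"),
    ("fx", 0, "Foreign Exchange"),
    ("currency", 0, "Foreign Exchange"),
    ("annual", 1, "Annual/Renewal"),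
    ("renewal", 1, "Annual/Renewal"),
    ("membership", 1, "Annual/Renewal"),
    ("maintenance", 2, "Account Maintenance"),
    ("minimum balance", 2, "Account Maintenance"),
    ("late payment", 3, "Penalties"),
    ("penalty", 3, "Penalties"),
    ("overdraft", 3, "Penalties"),
    ("atm", 4, "ATM/Withdrawal"),
    ("cash withdrawal", 4, "ATM/Withdrawal"),
    ("convenience", 5, "Transaction Fees"),
    ("processing", 5, "Transaction Fees"),
    ("transaction", 5, "Transaction Fees"),
    ("sms", 6, "Communication"),
    ("alert", 6, "Communication"),
    ("statement", 6, "Communication") ]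

-- loop body: 'if kw in low and (best is None or prio < best[0]): best = (prio, cat)'
def feeStep (low : String) (best : Option (Int × String)) (e : String × Int × String) :
    Option (Int × String) :=
  match best with
  | none => if PySem.Str.isIn e.1 low then some (e.2.1, e.2.2) else none
  | some (p, c) =>
      if PySem.Str.isIn e.1 low && decide (e.2.1 < p) then some (e.2.1, e.2.2) else some (p, c)

def categorize_fee_alt (line : String) : String :=
  let low := PySem.Str.lower line
  match feeKeywords.foldl (feeStep low) none with
  | some (_, c) => c
  | none => "Other Fees"

-- ===== PRECONDITION & SPEC =====
def Spec_categorize_fee (line : String) (out : String) : Prop := out = categorize_fee_alt line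
instance (line : String) (out : String) : Decidable (Spec_categorize_fee line out) := by unfold Spec_categorize_fee; infer_instance

-- ===== CLAIM (what is proved, stated in full; the proofs are below) =====
def Claim_equal_categorize_fee : Prop := ∀ (line : String), Dom_categorize_fee line → Spec_categorize_fee line (categorize_fee line)

-- ===== LEMMAS AND PROOFS =====

-- once the accumulator holds a priority ≤ every remaining priority, it never changes
theorem foldl_feeStep_some (low : String) (p : Int) (c : String)
    (ts : List (String × Int × String)) (h : ∀ e ∈ ts, p ≤ e.2.1) :
    ts.foldl (feeStep low) (some (p, c)) = some (p, c) := by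
  induction ts with
  | nil => rfl
  | cons t ts ih =>
      have hp : p ≤ t.2.1 := h t (List.mem_cons_self ..)
      have : feeStep low (some (p, c)) t = some (p, c) := by
        simp [feeStep]
        omega
      rw [List.foldl_cons, this]
      exact ih (fun e he => h e (List.mem_cons_of_mem _ he))

-- folding over one keyword group (all priority i, category c) from an empty accumulator:
-- first match of the group wins, otherwise fall through to the rest
theorem foldl_feeStep_group (low : String) (kws : List String) (i : Int) (c : String)
    (rest : List (String × Int × String)) (hrest : ∀ e ∈ rest, i ≤ e.2.1) :
    ((kws.map (fun k => (k, i, c))) ++ rest).foldl (feeStep low) none =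
      (if kws.any (fun k => PySem.Str.isIn k low) then some (i, c)
       else rest.foldl (feeStep low) none) := by
  induction kws with
  | nil => simp
  | cons k kws ih =>
      by_cases hk : PySem.Str.isIn k low = true
      · have hall : ∀ e ∈ (kws.map (fun k => (k, i, c))) ++ rest, i ≤ e.2.1 := by
          intro e he
          rcases List.mem_append.mp he with h1 | h2
          · rcases List.mem_map.mp h1 with ⟨_, _, rfl⟩; exact le_refl i
          · exact hrest e h2
        have hk' : PySem.Chars.isIn k.toList low.toList = true := by
          simpa using hk
        have hstep : feeStep low none (k, i, c) = some (i, c) := by simp [feeStep, hk']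
        rw [List.map_cons, List.cons_append, List.foldl_cons, hstep,
            foldl_feeStep_some low i c _ hall]
        simp [hk']
      · simp only [List.map_cons, List.cons_append, List.foldl_cons, feeStep, hk,
          Bool.false_eq_true, if_false, ih, List.any_cons, Bool.false_or]

-- ===== VERDICT (by name: the statement is the Claim_ definition above) =====
theorem categorize_fee_spec : Claim_equal_categorize_fee := by
  intro line _
  unfold Spec_categorize_fee categorize_fee categorize_fee_alt
  generalize PySem.Str.lower line = low
  have htable : feeKeywords =
      (["foreign", "fx", "currency"].map (fun k => (k, (0:Int), "Foreign Exchange"))) ++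
      ((["annual", "renewal", "membership"].map (fun k => (k, (1:Int), "Annual/Renewal"))) ++
      ((["maintenance", "minimum balance"].map (fun k => (k, (2:Int), "Account Maintenance"))) ++
      ((["late payment", "penalty", "overdraft"].map (fun k => (k, (3:Int), "Penalties"))) ++
      ((["atm", "cash withdrawal"].map (fun k => (k, (4:Int), "ATM/Withdrawal"))) ++
      ((["convenience", "processing", "transaction"].map (fun k => (k, (5:Int), "Transaction Fees"))) ++
      ((["sms", "alert", "statement"].map (fun k => (k, (6:Int), "Communication"))) ++ ([])))))))
    := by rfl
  rw [htable]
  dsimp only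
  rw [foldl_feeStep_group low _ 0 _ _ (by decide)]
  rw [foldl_feeStep_group low _ 1 _ _ (by decide)]
  rw [foldl_feeStep_group low _ 2 _ _ (by decide)]
  rw [foldl_feeStep_group low _ 3 _ _ (by decide)]
  rw [foldl_feeStep_group low _ 4 _ _ (by decide)]
  rw [foldl_feeStep_group low _ 5 _ _ (by decide)]
  rw [foldl_feeStep_group low _ 6 _ _ (by decide)]
  split_ifs <;> rfl
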